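-- pv_equiv track=rewrite | github.com/Dallahi-Ms/CS50P | Problem Set 2/plates.py | num_inmid
-- ===== SOURCE A (Python) =====
-- def num_inmid(e):
--     for i in range(len(e)):
--         if e[i].isdigit():
--             if e[i:].isdigit():
--                 return True
--             else:
--                 return False
--     return True
-- ===== SOURCE B (Python) =====
-- def num_inmid(e):
--     seen_digit = False
--     for c in e:
--         if seen_digit and not c.isdigit():
--             return False
--         if c.isdigit():
--             seen_digit = True
--     return True
-- ===== Notes on version B (the rewrite author's own statement) =====
-- stated objective: simpler
-- what changed: Replaces A's two-phase scan (index loop over range(len(e)) to find the first digit, then an .isdigit() check of the whole remaining slice) with a single state-machine pass over the characters maintaining a seen_digit flag; iterating characters directly avoids per-index e[i] indexing, which is the constant-factor speedup.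
import Mathlib
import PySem

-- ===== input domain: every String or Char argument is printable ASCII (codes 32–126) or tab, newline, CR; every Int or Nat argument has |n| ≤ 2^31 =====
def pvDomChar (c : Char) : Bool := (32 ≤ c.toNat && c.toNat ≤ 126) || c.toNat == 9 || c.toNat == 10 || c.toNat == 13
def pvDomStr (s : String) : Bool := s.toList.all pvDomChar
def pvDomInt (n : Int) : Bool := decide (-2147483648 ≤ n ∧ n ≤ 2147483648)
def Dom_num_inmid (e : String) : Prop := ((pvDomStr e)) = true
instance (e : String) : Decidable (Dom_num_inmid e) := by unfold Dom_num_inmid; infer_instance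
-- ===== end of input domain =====

-- B replaces A's two-phase scan (find first digit, then check the whole remaining slice
-- with .isdigit()) by a single state-machine pass carrying a seen-digit flag (simpler).


-- ===== PORT A =====
-- for i in range(len(e)): if e[i].isdigit(): return e[i:].isdigit(); return True
def numA_go (cs : List Char) (i : Nat) : Bool :=
  if h : i < cs.length then
    if PySem.Chars.isdigit cs[i] then
      PySem.Chars.strIsdigit (PySem.List.slice cs (some (i : Int)) none)   -- e[i:].isdigit()
    else numA_go cs (i + 1)
  else true
termination_by cs.length - i

def num_inmid (e : String) : Bool := numA_go e.toList 0

-- ===== PORT B =====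
-- single pass with a seen_digit flag
def numB_go : List Char → Bool → Bool
  | [], _ => true
  | c :: rest, seen =>
    if seen && !PySem.Chars.isdigit c then false
    else numB_go rest (seen || PySem.Chars.isdigit c)

def num_inmid_alt (e : String) : Bool := numB_go e.toList false

-- ===== PRECONDITION & SPEC =====
def Spec_num_inmid (e : String) (out : Bool) : Prop := out = num_inmid_alt e
instance (e : String) (out : Bool) : Decidable (Spec_num_inmid e out) := by unfold Spec_num_inmid; infer_instance

-- ===== CLAIM (what is proved, stated in full; the proofs are below) =====
def Claim_equal_num_inmid : Prop := ∀ (e : String), Dom_num_inmid e → Spec_num_inmid e (num_inmid e)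

-- ===== LEMMAS AND PROOFS =====

-- once a digit has been seen, B just checks that every remaining char is a digit
theorem numB_go_true (cs : List Char) : numB_go cs true = cs.all PySem.Chars.isdigit := by
  induction cs with
  | nil => rfl
  | cons c rest ih =>
    by_cases h : PySem.Chars.isdigit c = true <;> simp [numB_go, h, ih]

theorem numA_eq_numB (cs : List Char) (i : Nat) :
    numA_go cs i = numB_go (cs.drop i) false := by
  by_cases h : i < cs.length
  · have hdrop : cs.drop i = cs[i] :: cs.drop (i + 1) := List.drop_eq_getElem_cons h
    rw [numA_go]
    by_cases hd : PySem.Chars.isdigit cs[i] = true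
    · simp only [h, dif_pos, hd, if_pos]
      rw [PySem.List.slice_from_natCast, hdrop]
      simp only [PySem.Chars.strIsdigit, numB_go, Bool.not_true, Bool.false_and,
        Bool.false_eq_true, if_false, Bool.false_or, numB_go_true, List.isEmpty_cons,
        Bool.not_false, Bool.true_and, List.all_cons, hd]
    · have hd' : PySem.Chars.isdigit cs[i] = false := by simpa using hd
      simp only [h, dif_pos, hd', Bool.false_eq_true]
      rw [hdrop]
      simp only [numB_go, hd', Bool.false_or, Bool.not_false,
        Bool.and_true, if_neg (Bool.false_ne_true)]
      exact numA_eq_numB cs (i + 1)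
  · rw [numA_go]
    simp [h, List.drop_eq_nil_of_le (Nat.le_of_not_lt h), numB_go]
termination_by cs.length - i

-- ===== VERDICT (by name: the statement is the Claim_ definition above) =====
theorem num_inmid_spec : Claim_equal_num_inmid := by
  intro e _
  unfold Spec_num_inmid num_inmid num_inmid_alt
  simpa using numA_eq_numB e.toList 0
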